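-- pv_equiv track=rewrite | github.com/orashi/NSE_NAS | main.py | pretty_print_front
-- ===== SOURCE A (Python) =====
-- def pretty_print_front(code, alloc_plan, alloc_space=(1, 4, 4, 8, 4)):  # retrieve architecture code in list
--     if alloc_plan == 'NR':
--         back = ""
--         for i in alloc_space:
--             back += "N" * i + "R"
--         back = back[:-1]
--     elif alloc_plan == 'NER':
--         back = (lambda x: "N" * x[0] + "R" +
--                           "N" * x[1] + "R" +
--                           "N" * x[2] + "R" +
--                           "N" * x[3] + "E" +
--                           "N" * x[4] + "R" +
--                           "N" * x[5] + "E")(alloc_space)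
--
--     depth = [0] * len(alloc_space) if not 'I' in alloc_plan else [0] * len(alloc_space[0])
--     if 'E' in alloc_plan:
--         depth = depth + [0] * 2
--
--     depth_index = 0
--     for i, branches in enumerate(code):
--         if back[i] in ["N", "D", "I"]:
--             if len(branches) > 0:
--                 depth[depth_index] += 1
--         else:
--             depth_index += 1
--     code = [i for i in code if len(i) > 0]
--
--     return code, depth
-- ===== SOURCE B (Python) =====
-- def pretty_print_front(code, alloc_plan, alloc_space=(1, 4, 4, 8, 4)):  # retrieve architecture code in list
--     # Build the template string per plan.
--     if alloc_plan == 'NR':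
--         back = "R".join("N" * n for n in alloc_space)
--     elif alloc_plan == 'NER':
--         back = "".join("N" * n + s for n, s in zip(alloc_space, "RRRERE"))
--     else:
--         raise ValueError("unknown alloc_plan: %r" % (alloc_plan,))
--     nslots = len(alloc_space) + (2 if 'E' in alloc_plan else 0)
--     # Group the branch lists of `code` into buckets, one bucket per template segment.
--     segs = [[] for _ in range(nslots)]
--     b = 0
--     for ch, branches in zip(back, code):
--         if ch == 'N':
--             segs[b].append(branches)
--         else:
--             b += 1
--     depth = [sum(1 for branches in seg if len(branches) > 0) for seg in segs]
--     return [i for i in code if len(i) > 0], depth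
-- ===== Notes on version B (the rewrite author's own statement) =====
-- stated objective: alternative
-- what changed: B builds the template string by join/zip instead of A's concatenation-and-trim and lambda-indexing, and replaces A's single stateful pass with a depth_index counter by a two-phase decomposition: first group code's branch lists into one bucket per template segment, then fill depth by counting the non-empty lists in each bucket.
-- outside the precondition, e.g. on pretty_print_front([], 'X', (1, 2)): A returns ([], [0, 0]), B raises ValueError
import Mathlib
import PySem

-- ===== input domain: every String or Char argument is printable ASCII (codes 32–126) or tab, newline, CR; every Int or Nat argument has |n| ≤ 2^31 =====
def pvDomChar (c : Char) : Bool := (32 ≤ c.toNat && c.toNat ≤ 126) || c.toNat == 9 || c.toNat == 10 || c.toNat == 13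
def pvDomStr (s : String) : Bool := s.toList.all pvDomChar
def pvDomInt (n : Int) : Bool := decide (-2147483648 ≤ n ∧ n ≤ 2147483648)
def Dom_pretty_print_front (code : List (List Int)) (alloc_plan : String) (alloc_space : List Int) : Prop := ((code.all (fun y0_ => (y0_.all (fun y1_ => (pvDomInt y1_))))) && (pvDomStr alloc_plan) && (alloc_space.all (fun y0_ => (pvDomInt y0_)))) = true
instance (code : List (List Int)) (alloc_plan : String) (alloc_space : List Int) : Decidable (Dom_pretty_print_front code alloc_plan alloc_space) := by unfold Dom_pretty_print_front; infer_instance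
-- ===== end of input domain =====

-- B replaces A's single stateful depth_index pass by a group-into-buckets-then-count decomposition
-- (objective: alternative, same cost); neither program observably mutates its arguments.


-- ===== PORT A =====
-- "N" * i for a Python int i: a negative repeat count gives "" — Int.toNat matches that.
-- The `for i, branches in enumerate(code)` loop; back[i] raises IndexError when i ≥ len(back) and
-- depth[depth_index] += 1 raises when depth_index ≥ len(depth) — both excluded by Pre_, so getD/set are used.
def pvLoopA (back : List Char) : List (List Int) → Nat → List Int → Nat → List Int
  | [], _, depth, _ => depth
  | branches :: rest, i, depth, di =>
    if back.getD i ' ' ∈ (['N', 'D', 'I'] : List Char) then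
      pvLoopA back rest (i + 1) (if branches.length > 0 then depth.set di (depth.getD di 0 + 1) else depth) di
    else
      pvLoopA back rest (i + 1) depth (di + 1)

def pretty_print_front (code : List (List Int)) (alloc_plan : String) (alloc_space : List Int) : List (List Int) × List Int :=
  let back : List Char :=
    if alloc_plan = "NR" then
      -- back = ""; for i in alloc_space: back += "N"*i + "R"; back = back[:-1]  ([:-1] = dropLast, exact also on "")
      (alloc_space.foldl (fun acc i => acc ++ List.replicate i.toNat 'N' ++ ['R']) []).dropLast
    else if alloc_plan = "NER" then
      -- the lambda over x[0]..x[5]; Python raises IndexError when len(alloc_space) < 6 (excluded by Pre_), getD used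
      List.replicate (alloc_space.getD 0 0).toNat 'N' ++ ['R'] ++
      List.replicate (alloc_space.getD 1 0).toNat 'N' ++ ['R'] ++
      List.replicate (alloc_space.getD 2 0).toNat 'N' ++ ['R'] ++
      List.replicate (alloc_space.getD 3 0).toNat 'N' ++ ['E'] ++
      List.replicate (alloc_space.getD 4 0).toNat 'N' ++ ['R'] ++
      List.replicate (alloc_space.getD 5 0).toNat 'N' ++ ['E']
    else [] -- Python: back stays undefined; the loop raises NameError on any nonempty code (excluded by Pre_)
  let depth : List Int :=
    if 'I' ∈ alloc_plan.toList then [] -- Python: len(alloc_space[0]) raises TypeError here (excluded by Pre_)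
    else List.replicate alloc_space.length 0
  let depth := if 'E' ∈ alloc_plan.toList then depth ++ [0, 0] else depth
  let depth := pvLoopA back code 0 depth 0
  (code.filter (fun i => i.length > 0), depth)

-- ===== PORT B =====
-- str.join on a list of pieces, transliterated
def pvJoin (sep : List Char) : List (List Char) → List Char
  | [] => []
  | [x] => x
  | x :: xs => x ++ sep ++ pvJoin sep xs

-- the `for ch, branches in zip(back, code)` grouping loop; segs[b].append never sees b out of range
-- under Pre_ (set/getD used)
def pvLoopB : List (Char × List Int) → List (List (List Int)) → Nat → List (List (List Int))
  | [], segs, _ => segs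
  | (ch, branches) :: rest, segs, b =>
    if ch = 'N' then pvLoopB rest (segs.set b (segs.getD b [] ++ [branches])) b
    else pvLoopB rest segs (b + 1)

def pretty_print_front_alt (code : List (List Int)) (alloc_plan : String) (alloc_space : List Int) : List (List Int) × List Int :=
  let back : List Char :=
    if alloc_plan = "NR" then
      pvJoin ['R'] (alloc_space.map (fun n => List.replicate n.toNat 'N'))
    else if alloc_plan = "NER" then
      (alloc_space.zip ("RRRERE".toList)).flatMap (fun p => List.replicate p.1.toNat 'N' ++ [p.2])
    else [] -- Python B raises ValueError here (excluded by Pre_)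
  let nslots := alloc_space.length + (if 'E' ∈ alloc_plan.toList then 2 else 0)
  let segs := pvLoopB (back.zip code) (List.replicate nslots []) 0
  let depth := segs.map (fun seg => ((seg.filter (fun branches => branches.length > 0)).length : Int))
  (code.filter (fun i => i.length > 0), depth)

-- ===== PRECONDITION & SPEC =====
-- Pre_ excludes the inputs on which A raises (alloc_plan other than 'NR'/'NER' with nonempty code: NameError;
-- 'NER' with fewer than 6 entries: IndexError; code longer than the template: IndexError) and also alloc_plan
-- values other than 'NR'/'NER' with EMPTY code, where A returns a depth vector only because the undefined
-- template string is never consulted — an accident of unreachable code; B raises ValueError there.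
def Pre_pretty_print_front (code : List (List Int)) (alloc_plan : String) (alloc_space : List Int) : Prop :=
  (alloc_plan = "NR" ∧ code.length ≤ (alloc_space.map Int.toNat).sum + (alloc_space.length - 1))
  ∨ (alloc_plan = "NER" ∧ 6 ≤ alloc_space.length ∧
      code.length ≤ ((alloc_space.take 6).map Int.toNat).sum + 6)

instance (code : List (List Int)) (alloc_plan : String) (alloc_space : List Int) : Decidable (Pre_pretty_print_front code alloc_plan alloc_space) := by unfold Pre_pretty_print_front; infer_instance

def pvWitness_pretty_print_front : List (List Int) × String × List Int := ([[1], [], [2]], "NR", [2, 1])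

def Spec_pretty_print_front (code : List (List Int)) (alloc_plan : String) (alloc_space : List Int) (out : List (List Int) × List Int) : Prop := out = pretty_print_front_alt code alloc_plan alloc_space
instance (code : List (List Int)) (alloc_plan : String) (alloc_space : List Int) (out : List (List Int) × List Int) : Decidable (Spec_pretty_print_front code alloc_plan alloc_space out) := by unfold Spec_pretty_print_front; infer_instance

-- ===== CLAIM (what is proved, stated in full; the proofs are below) =====
def Claim_equal_pretty_print_front : Prop := ∀ (code : List (List Int)) (alloc_plan : String) (alloc_space : List Int), Dom_pretty_print_front code alloc_plan alloc_space → Pre_pretty_print_front code alloc_plan alloc_space → Spec_pretty_print_front code alloc_plan alloc_space (pretty_print_front code alloc_plan alloc_space)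

-- ===== LEMMAS AND PROOFS =====

-- the per-bucket count B takes of a finished bucket (the lambda inside pretty_print_front_alt)
def pvCnt (seg : List (List Int)) : Int := ((seg.filter (fun branches => branches.length > 0)).length : Int)

-- B's append-to-bucket, seen through pvCnt, is A's conditional increment (both no-op when b is out of range)
theorem pvSet_append_map (segs : List (List (List Int))) (b : Nat) (br : List Int) :
    (segs.set b (segs.getD b [] ++ [br])).map pvCnt
      = if br.length > 0 then (segs.map pvCnt).set b ((segs.map pvCnt).getD b 0 + 1)
        else segs.map pvCnt := by
  by_cases hb : b < segs.length
  · have hb' : b < (segs.map pvCnt).length := by simpa using hb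
    rw [List.getD_eq_getElem segs [] hb, List.map_set, List.getD_eq_getElem _ _ hb',
        List.getElem_map]
    by_cases hbr : br.length > 0
    · have h1 : pvCnt (segs[b] ++ [br]) = pvCnt segs[b] + 1 := by
        simp [pvCnt, List.filter_append, hbr]
      rw [h1, if_pos hbr]
    · have h0 : pvCnt (segs[b] ++ [br]) = pvCnt segs[b] := by
        simp [pvCnt, List.filter_append, hbr]
      have h2 : pvCnt segs[b] = (segs.map pvCnt)[b] := (List.getElem_map (f := pvCnt)).symm
      rw [h0, if_neg hbr, h2, List.set_getElem_self]
  · have h1 : segs.set b (segs.getD b [] ++ [br]) = segs := List.set_eq_of_length_le (by omega)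
    have h2 : ∀ v, (segs.map pvCnt).set b v = segs.map pvCnt := fun v =>
      List.set_eq_of_length_le (by simp; omega)
    rw [h1]; split_ifs <;> simp [h2]

-- core: A's indexed stateful pass equals B's grouping pass, observed through pvCnt
theorem pvKey (code : List (List Int)) (back : List Char) : ∀ (i : Nat)
    (segs : List (List (List Int))) (b : Nat),
    i + code.length ≤ back.length →
    (∀ c ∈ back, c = 'N' ∨ c ∉ (['N', 'D', 'I'] : List Char)) →
    pvLoopA back code i (segs.map pvCnt) b = (pvLoopB ((back.drop i).zip code) segs b).map pvCnt := by
  induction code with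
  | nil => intro i segs b _ _; simp [pvLoopA, pvLoopB, List.zip_nil_right]
  | cons br rest ih =>
    intro i segs b h hc
    have hi : i < back.length := by simp at h; omega
    have hdrop : back.drop i = back[i] :: back.drop (i + 1) := List.drop_eq_getElem_cons hi
    have hgd : back.getD i ' ' = back[i] := List.getD_eq_getElem back ' ' hi
    have h' : (i + 1) + rest.length ≤ back.length := by simp at h; omega
    rcases hc back[i] (List.getElem_mem hi) with hN | hnot
    · rw [hdrop, List.zip_cons_cons]
      simp only [pvLoopA, pvLoopB, hgd, hN, if_true]
      rw [← pvSet_append_map]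
      exact ih (i + 1) _ b h' hc
    · have hne : back[i] ≠ 'N' := by
        intro he; rw [he] at hnot; exact hnot (by decide)
      rw [hdrop, List.zip_cons_cons]
      simp only [pvLoopA, pvLoopB, hgd]
      rw [if_neg hnot, if_neg hne]
      exact ih (i + 1) segs (b + 1) h' hc

-- characters of the two templates
theorem pvJoin_chars (as : List Int) :
    ∀ c ∈ pvJoin ['R'] (as.map (fun n => List.replicate n.toNat 'N')), c = 'N' ∨ c = 'R' := by
  induction as with
  | nil => simp [pvJoin]
  | cons a t ih =>
    cases t with
    | nil =>
      intro c hc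
      simp only [List.map_cons, List.map_nil, pvJoin] at hc
      exact Or.inl (List.eq_of_mem_replicate hc)
    | cons b t2 =>
      intro c hc
      simp only [List.map_cons, pvJoin, List.mem_append] at hc
      rcases hc with (hc | hc) | hc
      · exact Or.inl (List.eq_of_mem_replicate hc)
      · simp at hc; exact Or.inr hc
      · exact ih c (by simpa [pvJoin] using hc)

set_option maxRecDepth 4096 in
theorem pvFlat_chars (as : List Int) :
    ∀ c ∈ (as.zip ("RRRERE".toList)).flatMap (fun p => List.replicate p.1.toNat 'N' ++ [p.2]),
      c = 'N' ∨ c = 'R' ∨ c = 'E' := by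
  intro c hc
  rw [List.mem_flatMap] at hc
  obtain ⟨p, hp, hcp⟩ := hc
  rcases List.mem_append.mp hcp with hcl | hcr
  · exact Or.inl (List.eq_of_mem_replicate hcl)
  · have hsnd : p.2 ∈ ("RRRERE".toList) := (List.of_mem_zip hp).2
    have hs : ("RRRERE".toList) = ['R', 'R', 'R', 'E', 'R', 'E'] := by decide
    rw [hs] at hsnd
    simp at hsnd
    simp at hcr
    subst hcr
    exact Or.inr (by tauto)

-- A's concatenate-then-trim NR template equals B's join
theorem pvFoldl_acc (as : List Int) : ∀ acc : List Char,
    as.foldl (fun acc i => acc ++ List.replicate i.toNat 'N' ++ ['R']) acc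
      = acc ++ as.flatMap (fun i => List.replicate i.toNat 'N' ++ ['R']) := by
  induction as with
  | nil => intro acc; simp
  | cons a t ih =>
    intro acc
    rw [List.foldl_cons, ih, List.flatMap_cons]
    simp [List.append_assoc]

theorem pvBack_NR (as : List Int) :
    (as.foldl (fun acc i => acc ++ List.replicate i.toNat 'N' ++ ['R']) []).dropLast
      = pvJoin ['R'] (as.map (fun n => List.replicate n.toNat 'N')) := by
  rw [pvFoldl_acc, List.nil_append]
  induction as with
  | nil => simp [pvJoin]
  | cons a t ih =>
    cases t with
    | nil => simp [pvJoin, List.flatMap_cons]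
    | cons b t2 =>
      have hne : (b :: t2).flatMap (fun i => List.replicate i.toNat 'N' ++ ['R']) ≠ [] := by
        simp [List.flatMap_cons]
      rw [List.flatMap_cons, List.dropLast_append_of_ne_nil hne, ih]
      simp [pvJoin, List.append_assoc]

theorem pvJoin_length (as : List Int) :
    (pvJoin ['R'] (as.map (fun n => List.replicate n.toNat 'N'))).length
      = (as.map Int.toNat).sum + (as.length - 1) := by
  induction as with
  | nil => simp [pvJoin]
  | cons a t ih =>
    cases t with
    | nil => simp [pvJoin]
    | cons b t2 =>
      have hj : pvJoin ['R'] ((a :: b :: t2).map (fun n => List.replicate n.toNat 'N'))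
          = List.replicate a.toNat 'N' ++ ['R'] ++ pvJoin ['R'] ((b :: t2).map (fun n => List.replicate n.toNat 'N')) := by
        simp [pvJoin]
      rw [hj, List.length_append, List.length_append, ih]
      simp only [List.map_cons, List.sum_cons, List.length_cons, List.length_nil,
        List.length_replicate]
      omega

-- A's lambda-built NER template equals B's zip/flatMap form (six entries are read; Pre_ guarantees them)
set_option maxRecDepth 4096 in
theorem pvBack_NER (as : List Int) (h : 6 ≤ as.length) :
    (List.replicate (as.getD 0 0).toNat 'N' ++ ['R'] ++
     List.replicate (as.getD 1 0).toNat 'N' ++ ['R'] ++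
     List.replicate (as.getD 2 0).toNat 'N' ++ ['R'] ++
     List.replicate (as.getD 3 0).toNat 'N' ++ ['E'] ++
     List.replicate (as.getD 4 0).toNat 'N' ++ ['R'] ++
     List.replicate (as.getD 5 0).toNat 'N' ++ ['E'])
      = (as.zip ("RRRERE".toList)).flatMap (fun p => List.replicate p.1.toNat 'N' ++ [p.2]) := by
  rcases as with _ | ⟨a0, as⟩; · simp at h
  rcases as with _ | ⟨a1, as⟩; · simp at h
  rcases as with _ | ⟨a2, as⟩; · simp at h
  rcases as with _ | ⟨a3, as⟩; · simp at h
  rcases as with _ | ⟨a4, as⟩; · simp at h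
  rcases as with _ | ⟨a5, as⟩; · simp at h
  have hs : ("RRRERE".toList) = ['R', 'R', 'R', 'E', 'R', 'E'] := by decide
  simp [hs, List.zip_cons_cons, List.zip_nil_right, List.flatMap_cons, List.getD,
    List.append_assoc]

set_option maxRecDepth 4096 in
theorem pvNER_length (as : List Int) (h : 6 ≤ as.length) :
    ((as.zip ("RRRERE".toList)).flatMap (fun p => List.replicate p.1.toNat 'N' ++ [p.2])).length
      = ((as.take 6).map Int.toNat).sum + 6 := by
  rcases as with _ | ⟨a0, as⟩; · simp at h
  rcases as with _ | ⟨a1, as⟩; · simp at h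
  rcases as with _ | ⟨a2, as⟩; · simp at h
  rcases as with _ | ⟨a3, as⟩; · simp at h
  rcases as with _ | ⟨a4, as⟩; · simp at h
  rcases as with _ | ⟨a5, as⟩; · simp at h
  have hs : ("RRRERE".toList) = ['R', 'R', 'R', 'E', 'R', 'E'] := by decide
  have ht : (a0 :: a1 :: a2 :: a3 :: a4 :: a5 :: as).take 6 = [a0, a1, a2, a3, a4, a5] := rfl
  simp [hs, ht, List.zip_cons_cons, List.zip_nil_right, List.flatMap_cons]
  omega

-- ===== VERDICT (by name: the statement is the Claim_ definition above) =====
theorem pretty_print_front_spec : Claim_equal_pretty_print_front := by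
  intro code alloc_plan alloc_space _hdom hpre
  unfold Spec_pretty_print_front
  rcases hpre with ⟨hp, hlen⟩ | ⟨hp, h6, hlen⟩
  · subst hp
    have c1 : (("NR" : String) = "NR") = True := eq_true rfl
    have c2 : ('I' ∈ ("NR" : String).toList) = False := eq_false (by decide)
    have c3 : ('E' ∈ ("NR" : String).toList) = False := eq_false (by decide)
    simp only [pretty_print_front, pretty_print_front_alt, c2, c3, if_true, if_false,
      Nat.add_zero]
    rw [pvBack_NR]
    refine congrArg _ ?_
    have hmap : List.replicate alloc_space.length (0 : Int)
        = (List.replicate alloc_space.length ([] : List (List Int))).map pvCnt := by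
      simp [pvCnt]
    rw [hmap,
      show (pvJoin ['R'] (alloc_space.map (fun n => List.replicate n.toNat 'N'))).zip code
          = ((pvJoin ['R'] (alloc_space.map (fun n => List.replicate n.toNat 'N'))).drop 0).zip code
        from by rw [List.drop_zero]]
    refine pvKey code _ 0 _ 0 (by rw [pvJoin_length]; omega) ?_
    intro c hc
    rcases pvJoin_chars alloc_space c hc with h | h
    · exact Or.inl h
    · subst h; exact Or.inr (by decide)
  · subst hp
    have c1 : (("NER" : String) = "NR") = False := eq_false (by decide)
    have c2 : (("NER" : String) = "NER") = True := eq_true rfl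
    have c3 : ('I' ∈ ("NER" : String).toList) = False := eq_false (by decide)
    have c4 : ('E' ∈ ("NER" : String).toList) = True := eq_true (by decide)
    simp only [pretty_print_front, pretty_print_front_alt, c1, c3, c4, if_true, if_false]
    rw [pvBack_NER alloc_space h6]
    refine congrArg _ ?_
    have hrep : List.replicate alloc_space.length (0 : Int) ++ [0, 0]
        = List.replicate (alloc_space.length + 2) 0 := by
      rw [List.replicate_add]; rfl
    have hmap : List.replicate (alloc_space.length + 2) (0 : Int)
        = (List.replicate (alloc_space.length + 2) ([] : List (List Int))).map pvCnt := by
      simp [pvCnt]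
    rw [hrep, hmap,
      show ((alloc_space.zip ("RRRERE".toList)).flatMap
              (fun p => List.replicate p.1.toNat 'N' ++ [p.2])).zip code
          = (((alloc_space.zip ("RRRERE".toList)).flatMap
              (fun p => List.replicate p.1.toNat 'N' ++ [p.2])).drop 0).zip code
        from by rw [List.drop_zero]]
    refine pvKey code _ 0 _ 0 (by rw [pvNER_length alloc_space h6]; omega) ?_
    intro c hc
    rcases pvFlat_chars alloc_space c hc with h | h | h
    · exact Or.inl h
    · subst h; exact Or.inr (by decide)
    · subst h; exact Or.inr (by decide)
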